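-- pv_equiv track=rewrite | github.com/Rafael-2109/frete-sistema | migration/knowledge_migrator.py | _extract_table_name
-- ===== SOURCE A (Python) =====
-- def _extract_table_name(create_statement: str) -> str:
--     """Extract table name from CREATE TABLE statement"""
--     try:
--         # Simple regex-like extraction
--         parts = create_statement.split()
--         for i, part in enumerate(parts):
--             if part.upper() == "TABLE":
--                 if i + 1 < len(parts):
--                     return parts[i + 1].strip('(`)')
--         return "unknown_table"
--     except:
--         return "unknown_table"
-- ===== SOURCE B (Python) =====
-- def _extract_table_name(create_statement: str) -> str:
--     """Extract table name from CREATE TABLE statement"""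
--     s = create_statement
--     n = len(s)
--     i = 0
--     while i < n:
--         if s[i].isspace():
--             i += 1
--             continue
--         j = i
--         while j < n and not s[j].isspace():
--             j += 1
--         if s[i:j].upper() == "TABLE":
--             k = j
--             while k < n and s[k].isspace():
--                 k += 1
--             m = k
--             while m < n and not s[m].isspace():
--                 m += 1
--             name = s[k:m]
--             return name.strip('(`)') if name else "unknown_table"
--         i = j
--     return "unknown_table"
-- ===== Notes on version B (the rewrite author's own statement) =====
-- stated objective: alternative
-- what changed: A tokenizes the whole statement with split() into a list and enumerates it with index arithmetic; B never builds a token list: it is a cursor-based character scanner over the raw string that skips whitespace runs, delimits one word at a time by index, and on finding TABLE delimits and strips the following word in place.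
import Mathlib
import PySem

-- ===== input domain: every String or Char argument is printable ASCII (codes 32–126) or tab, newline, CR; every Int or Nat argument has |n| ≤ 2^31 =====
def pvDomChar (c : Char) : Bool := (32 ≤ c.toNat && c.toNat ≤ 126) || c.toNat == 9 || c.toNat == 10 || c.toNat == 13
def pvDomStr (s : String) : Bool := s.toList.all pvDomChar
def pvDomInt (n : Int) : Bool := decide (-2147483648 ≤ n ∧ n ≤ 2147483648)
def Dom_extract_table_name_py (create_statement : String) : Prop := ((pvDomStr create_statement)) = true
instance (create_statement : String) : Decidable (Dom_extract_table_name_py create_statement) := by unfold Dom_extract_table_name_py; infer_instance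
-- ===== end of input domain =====

-- B replaces A's split()-into-a-token-list + enumerate scan by a cursor-based character
-- scanner over the raw string that never builds a token list: an alternative algorithm, same cost.

-- ===== PORT A =====
-- the 'for i, part in enumerate(parts)' loop with early return
def pvALoop (parts : List String) : List (Int × String) → String
  | [] => "unknown_table"
  | (i, part) :: rest =>
    if PySem.Str.upper part = "TABLE" then
      if i + 1 < (parts.length : Int) then
        PySem.Str.stripChars ((PySem.List.pyGet? parts (i + 1)).getD "") "(`)"
      else pvALoop parts rest
    else pvALoop parts rest

def extract_table_name_py (create_statement : String) : String :=
  let parts := PySem.Str.split₀ create_statement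
  pvALoop parts (PySem.List.enumerate parts 0)

-- ===== PORT B =====
def pvNonsp (c : Char) : Bool := !PySem.Chars.isspace c

-- the outer 'while i < n' cursor loop of Source B; the inner index-advancing 'while' runs
-- (collect a run of non-space chars / skip a run of spaces) are takeWhile/dropWhile
def pvBScan : List Char → String
  | [] => "unknown_table"
  | c :: rest =>
    if PySem.Chars.isspace c then pvBScan rest
    else
      if PySem.Chars.upper (c :: rest.takeWhile pvNonsp) = "TABLE".toList then
        let name := ((rest.dropWhile pvNonsp).dropWhile PySem.Chars.isspace).takeWhile pvNonsp
        if name.isEmpty then "unknown_table"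
        else String.ofList (PySem.Chars.stripChars name "(`)".toList)
      else pvBScan (rest.dropWhile pvNonsp)
termination_by cs => cs.length
decreasing_by
  · simp
  · have := List.length_dropWhile_le pvNonsp rest
    simp; omega

def extract_table_name_py_alt (create_statement : String) : String :=
  pvBScan create_statement.toList

-- ===== PRECONDITION & SPEC =====
def Spec_extract_table_name_py (create_statement : String) (out : String) : Prop := out = extract_table_name_py_alt create_statement
instance (create_statement : String) (out : String) : Decidable (Spec_extract_table_name_py create_statement out) := by unfold Spec_extract_table_name_py; infer_instance

-- ===== CLAIM (what is proved, stated in full; the proofs are below) =====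
def Claim_equal_extract_table_name_py : Prop := ∀ (create_statement : String), Dom_extract_table_name_py create_statement → Spec_extract_table_name_py create_statement (extract_table_name_py create_statement)

-- ===== LEMMAS AND PROOFS =====

-- common reference form: walk the token list, on the first TABLE return the stripped next token
def tokWalkS : List String → String
  | [] => "unknown_table"
  | t :: rest =>
    if PySem.Str.upper t = "TABLE" then
      match rest with
      | [] => "unknown_table"
      | n :: _ => PySem.Str.stripChars n "(`)"
    else tokWalkS rest

def tokWalkC : List (List Char) → String
  | [] => "unknown_table"
  | t :: rest =>
    if PySem.Chars.upper t = "TABLE".toList then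
      match rest with
      | [] => "unknown_table"
      | n :: _ => String.ofList (PySem.Chars.stripChars n "(`)".toList)
    else tokWalkC rest

-- ---- A-side: pvALoop over enumerate = tokWalkS ----
theorem pvA_key (parts : List String) (s : List String) :
    ∀ (i : Nat), parts.drop i = s →
      pvALoop parts (PySem.List.enumerate s (i : Int)) = tokWalkS s := by
  induction s with
  | nil => intro i h; simp [PySem.List.enumerate_nil, pvALoop, tokWalkS]
  | cons p t ih =>
    intro i h
    have hlen : parts.length = i + 1 + t.length := by
      have := congrArg List.length h
      simp [List.length_drop] at this
      have hi : i < parts.length := by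
        by_contra hc
        rw [not_lt] at hc
        rw [List.drop_eq_nil_of_le hc] at h
        exact (List.cons_ne_nil _ _) h.symm
      omega
    have hdrop1 : parts.drop (i + 1) = t := by
      rw [← List.tail_drop, h]; rfl
    rw [PySem.List.enumerate_cons]
    by_cases hp : PySem.Str.upper p = "TABLE"
    · cases t with
      | nil =>
        have hcond : ¬ ((i : Int) + 1 < (parts.length : Int)) := by
          simp [hlen]
        simp [pvALoop, hp, hcond, PySem.List.enumerate_nil, tokWalkS]
      | cons nxt t' =>
        have hcond : (i : Int) + 1 < (parts.length : Int) := by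
          have h2 : (nxt :: t').length = t'.length + 1 := rfl
          rw [hlen, h2]; push_cast; omega
        have hget : parts[i + 1]? = some nxt := by
          have : (parts.drop i)[1]? = parts[i + 1]? := by
            rw [List.getElem?_drop]
          rw [← this, h]; rfl
        have hcast : (i : Int) + 1 = ((i + 1 : Nat) : Int) := by push_cast; ring
        show (if PySem.Str.upper p = "TABLE" then
            if (i : Int) + 1 < (parts.length : Int) then
              PySem.Str.stripChars ((PySem.List.pyGet? parts ((i : Int) + 1)).getD "") "(`)"
            else pvALoop parts (PySem.List.enumerate (nxt :: t') ((i : Int) + 1))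
          else pvALoop parts (PySem.List.enumerate (nxt :: t') ((i : Int) + 1))) = _
        rw [if_pos hp, if_pos hcond, hcast, PySem.List.pyGet?_natCast, hget]
        simp [tokWalkS, hp]
    · have hrec : pvALoop parts ((( i : Int), p) :: PySem.List.enumerate t ((i : Int) + 1)) =
          pvALoop parts (PySem.List.enumerate t ((i : Int) + 1)) := by
        simp [pvALoop, hp]
      have hcast : (i : Int) + 1 = ((i + 1 : Nat) : Int) := by push_cast; ring
      rw [hrec, hcast, ih (i + 1) hdrop1]
      simp [tokWalkS, hp]

-- ---- bridge: tokWalkS over the string tokens = tokWalkC over the char-list tokens ----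
theorem tokWalk_bridge (l : List (List Char)) :
    tokWalkS (l.map String.ofList) = tokWalkC l := by
  induction l with
  | nil => rfl
  | cons t rest ih =>
    have hupper : (PySem.Str.upper (String.ofList t) = "TABLE")
        ↔ (PySem.Chars.upper t = "TABLE".toList) := by
      constructor
      · intro h
        have := congrArg String.toList h
        simpa [PySem.Str.upper] using this
      · intro h
        simp [PySem.Str.upper, h]
    by_cases hp : PySem.Chars.upper t = "TABLE".toList
    · have h1 : PySem.Str.upper (String.ofList t) = "TABLE" := hupper.mpr hp
      cases rest with
      | nil =>
        show (if PySem.Str.upper (String.ofList t) = "TABLE" then "unknown_table"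
              else tokWalkS []) =
             (if PySem.Chars.upper t = "TABLE".toList then "unknown_table" else tokWalkC [])
        rw [if_pos h1, if_pos hp]
      | cons n r =>
        show (if PySem.Str.upper (String.ofList t) = "TABLE" then
                PySem.Str.stripChars (String.ofList n) "(`)"
              else tokWalkS (List.map String.ofList (n :: r))) =
             (if PySem.Chars.upper t = "TABLE".toList then
                String.ofList (PySem.Chars.stripChars n "(`)".toList)
              else tokWalkC (n :: r))
        rw [if_pos h1, if_pos hp]
        simp [PySem.Str.stripChars]
    · have h1 : ¬ PySem.Str.upper (String.ofList t) = "TABLE" := fun h => hp (hupper.mp h)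
      cases rest with
      | nil =>
        show (if PySem.Str.upper (String.ofList t) = "TABLE" then "unknown_table"
              else tokWalkS []) =
             (if PySem.Chars.upper t = "TABLE".toList then "unknown_table" else tokWalkC [])
        rw [if_neg h1, if_neg hp]
        rfl
      | cons n r =>
        show (if PySem.Str.upper (String.ofList t) = "TABLE" then
                PySem.Str.stripChars (String.ofList n) "(`)"
              else tokWalkS (List.map String.ofList (n :: r))) =
             (if PySem.Chars.upper t = "TABLE".toList then
                String.ofList (PySem.Chars.stripChars n "(`)".toList)
              else tokWalkC (n :: r))
        rw [if_neg h1, if_neg hp]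
        exact ih

-- ---- characterisation of Chars.split₀ ----
-- one-step equations of the split₀ scanner (definitional)
theorem go_nil (cur : List Char) (acc : List (List Char)) :
    PySem.Chars.split₀.go [] cur acc =
      if cur.isEmpty then acc.reverse else (cur.reverse :: acc).reverse := rfl

theorem go_cons (c : Char) (rest cur : List Char) (acc : List (List Char)) :
    PySem.Chars.split₀.go (c :: rest) cur acc =
      if PySem.Chars.isspace c then
        (if cur.isEmpty then PySem.Chars.split₀.go rest [] acc
         else PySem.Chars.split₀.go rest [] (cur.reverse :: acc))
      else PySem.Chars.split₀.go rest (c :: cur) acc := rfl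

theorem split₀_go_acc : ∀ (cs cur : List Char) (acc : List (List Char)),
    PySem.Chars.split₀.go cs cur acc = acc.reverse ++ PySem.Chars.split₀.go cs cur [] := by
  intro cs
  induction cs with
  | nil =>
    intro cur acc
    by_cases h : cur.isEmpty <;> simp [go_nil, h]
  | cons c rest ih =>
    intro cur acc
    by_cases hs : PySem.Chars.isspace c
    · by_cases he : cur.isEmpty
      · rw [go_cons, go_cons, if_pos hs, if_pos hs, if_pos he, if_pos he, ih [] acc]
      · rw [go_cons, go_cons, if_pos hs, if_pos hs, if_neg he, if_neg he,
          ih [] (cur.reverse :: acc), ih [] [cur.reverse]]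
        simp
    · rw [go_cons, go_cons, if_neg hs, if_neg hs]
      exact ih (c :: cur) acc

theorem split₀_go_word : ∀ (cs cur : List Char), cur ≠ [] →
    PySem.Chars.split₀.go cs cur [] =
      (cur.reverse ++ cs.takeWhile pvNonsp) :: PySem.Chars.split₀.go (cs.dropWhile pvNonsp) [] [] := by
  intro cs
  induction cs with
  | nil =>
    intro cur hc
    have he : cur.isEmpty = false := by simpa using hc
    simp [go_nil, he]
  | cons c rest ih =>
    intro cur hc
    have he : cur.isEmpty = false := by simpa using hc
    by_cases hs : PySem.Chars.isspace c
    · have hns : pvNonsp c = false := by simp [pvNonsp, hs]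
      rw [go_cons, if_pos hs, if_neg (by simp [he]), split₀_go_acc rest [] [cur.reverse]]
      rw [List.takeWhile_cons_of_neg (by simp [hns]), List.dropWhile_cons_of_neg (by simp [hns])]
      rw [go_cons, if_pos hs]
      simp
    · have hns : pvNonsp c = true := by simp [pvNonsp, hs]
      rw [go_cons, if_neg hs, ih (c :: cur) (List.cons_ne_nil _ _)]
      rw [List.takeWhile_cons_of_pos hns, List.dropWhile_cons_of_pos hns]
      simp

theorem split₀_cons (c : Char) (cs : List Char) :
    PySem.Chars.split₀ (c :: cs) =
      if PySem.Chars.isspace c then PySem.Chars.split₀ cs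
      else (c :: cs.takeWhile pvNonsp) :: PySem.Chars.split₀ (cs.dropWhile pvNonsp) := by
  by_cases hs : PySem.Chars.isspace c
  · simp only [PySem.Chars.split₀, go_cons, if_pos hs, List.isEmpty_nil, if_true]
  · simp only [PySem.Chars.split₀, go_cons, if_neg hs]
    rw [split₀_go_word cs [c] (List.cons_ne_nil _ _)]
    simp

theorem split₀_nil : PySem.Chars.split₀ [] = [] := rfl

-- split₀ after dropping leading whitespace
theorem split₀_dropspace (cs : List Char) :
    PySem.Chars.split₀ ((cs.dropWhile PySem.Chars.isspace)) = PySem.Chars.split₀ cs := by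
  induction cs with
  | nil => rfl
  | cons c rest ih =>
    by_cases hs : PySem.Chars.isspace c
    · rw [List.dropWhile_cons_of_pos hs, ih, split₀_cons, if_pos hs]
    · rw [List.dropWhile_cons_of_neg (by simp [hs])]

-- head of a dropWhile result falsifies the predicate
theorem dropWhile_head_false {p : Char → Bool} {cs : List Char} {d : Char} {ds : List Char}
    (h : cs.dropWhile p = d :: ds) : p d = false := by
  induction cs with
  | nil => simp at h
  | cons c rest ih =>
    by_cases hp : p c
    · rw [List.dropWhile_cons_of_pos hp] at h; exact ih h
    · rw [List.dropWhile_cons_of_neg (by simp [hp])] at h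
      cases h; simpa using hp

-- ---- B-side: pvBScan = tokWalkC ∘ split₀ ----
theorem pvB_key : ∀ (cs : List Char), pvBScan cs = tokWalkC (PySem.Chars.split₀ cs) := by
  intro cs
  induction cs using pvBScan.induct with
  | case1 => simp [pvBScan, split₀_nil, tokWalkC]
  | case2 c rest hs ih =>
    rw [split₀_cons, if_pos hs]
    rw [show pvBScan (c :: rest) = pvBScan rest by simp only [pvBScan, hs, if_true]]
    exact ih
  | case3 c rest hs htab name hnm =>
    -- TABLE found, no following token
    have hnm' : (List.takeWhile pvNonsp
        (List.dropWhile PySem.Chars.isspace (List.dropWhile pvNonsp rest))).isEmpty = true := hnm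
    rw [split₀_cons, if_neg hs]
    have hstep : pvBScan (c :: rest) = "unknown_table" := by
      simp only [pvBScan, hs, Bool.false_eq_true, if_false, htab, if_true]
      rw [if_pos hnm']
    rw [hstep]
    have hd : (List.dropWhile pvNonsp rest).dropWhile PySem.Chars.isspace = [] := by
      rcases h : (List.dropWhile pvNonsp rest).dropWhile PySem.Chars.isspace with _ | ⟨d, ds⟩
      · rfl
      · exfalso
        have hdns : pvNonsp d = true := by
          have := dropWhile_head_false h
          simp [pvNonsp, this]
        rw [h, List.takeWhile_cons_of_pos hdns] at hnm'
        simp at hnm'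
    have : PySem.Chars.split₀ (List.dropWhile pvNonsp rest) = [] := by
      rw [← split₀_dropspace (List.dropWhile pvNonsp rest), hd, split₀_nil]
    rw [this]
    simp [tokWalkC, htab]
  | case4 c rest hs htab name hnm =>
    -- TABLE found, following name nonempty
    have hnm' : ¬ (List.takeWhile pvNonsp
        (List.dropWhile PySem.Chars.isspace (List.dropWhile pvNonsp rest))).isEmpty = true := hnm
    rw [split₀_cons, if_neg hs]
    have hstep : pvBScan (c :: rest) =
        String.ofList (PySem.Chars.stripChars
          (List.takeWhile pvNonsp
            (List.dropWhile PySem.Chars.isspace (List.dropWhile pvNonsp rest))) "(`)".toList) := by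
      simp only [pvBScan, hs, Bool.false_eq_true, if_false, htab, if_true]
      rw [if_neg hnm']
    rw [hstep]
    rcases hd : (List.dropWhile pvNonsp rest).dropWhile PySem.Chars.isspace with _ | ⟨d, ds⟩
    · exfalso
      rw [hd] at hnm'
      simp at hnm'
    · have hdns : pvNonsp d = true := by
        have := dropWhile_head_false hd
        simp [pvNonsp, this]
      have hsplit : PySem.Chars.split₀ (List.dropWhile pvNonsp rest) =
          (d :: ds.takeWhile pvNonsp) :: PySem.Chars.split₀ (ds.dropWhile pvNonsp) := by
        rw [← split₀_dropspace (List.dropWhile pvNonsp rest), hd, split₀_cons,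
          if_neg (by simp [dropWhile_head_false hd])]
      have htab' : PySem.Chars.upper (c :: List.takeWhile pvNonsp rest) = ['T','A','B','L','E'] := by
        simpa using htab
      rw [hsplit, List.takeWhile_cons_of_pos hdns]
      simp [tokWalkC, htab']
  | case5 c rest hs htab ih =>
    rw [split₀_cons, if_neg hs]
    rw [show pvBScan (c :: rest) = pvBScan (rest.dropWhile pvNonsp) by
      simp only [pvBScan, hs, Bool.false_eq_true, if_false, htab]]
    rw [ih]
    have htab' : ¬ PySem.Chars.upper (c :: List.takeWhile pvNonsp rest) = ['T','A','B','L','E'] := by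
      simpa using htab
    simp [tokWalkC, htab']

-- ===== VERDICT (by name: the statement is the Claim_ definition above) =====
theorem extract_table_name_py_spec : Claim_equal_extract_table_name_py := by
  intro s _
  unfold Spec_extract_table_name_py extract_table_name_py extract_table_name_py_alt
  have h := pvA_key (PySem.Str.split₀ s) (PySem.Str.split₀ s) 0 (by simp)
  have hb := pvB_key s.toList
  have hbr : tokWalkS (PySem.Str.split₀ s) = tokWalkC (PySem.Chars.split₀ s.toList) :=
    tokWalk_bridge (PySem.Chars.split₀ s.toList)
  simp only [Nat.cast_zero] at h
  rw [hb, ← hbr]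
  exact h
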